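-- pv_equiv track=rewrite | github.com/notadragon/adventofcode | 2020/5/2020_5_1.py | makerowids
-- ===== SOURCE A (Python) =====
-- def makerowids(low,hi,bits):
--     output = {}
--     for i in range(0,1 << bits):
--
--         binrep = "{0:b}".format(i)
--         while len(binrep) < bits:
--             binrep = "0" + binrep
--         irep = "".join([ hi if b == "1" else low for b in binrep ])
--         output[irep] = i
--     return output
-- ===== SOURCE B (Python) =====
-- def makerowids(low, hi, bits):
--     keys = ['']
--     for _ in range(bits):
--         keys = [k + c for k in keys for c in (low, hi)]
--     return {k: i for i, k in enumerate(keys)}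
-- ===== Notes on version B (the rewrite author's own statement) =====
-- stated objective: simpler
-- what changed: B drops A's per-integer binary-format-and-pad construction entirely and instead grows the key list directly, appending a low/high character to every key once per bit round, then enumerates the finished list; only bits=0 differs (see differs).
-- intended difference: For bits = 0 (and low != '') A returns {low: 0} because it pads 0 to the one-char string '0' and maps it through low, while B returns {'': 0}, the intended empty key for a zero-bit pattern. — e.g. on makerowids("a", "b", 0): A returns [("a", 0)], B returns [("", 0)]
import Mathlib
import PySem

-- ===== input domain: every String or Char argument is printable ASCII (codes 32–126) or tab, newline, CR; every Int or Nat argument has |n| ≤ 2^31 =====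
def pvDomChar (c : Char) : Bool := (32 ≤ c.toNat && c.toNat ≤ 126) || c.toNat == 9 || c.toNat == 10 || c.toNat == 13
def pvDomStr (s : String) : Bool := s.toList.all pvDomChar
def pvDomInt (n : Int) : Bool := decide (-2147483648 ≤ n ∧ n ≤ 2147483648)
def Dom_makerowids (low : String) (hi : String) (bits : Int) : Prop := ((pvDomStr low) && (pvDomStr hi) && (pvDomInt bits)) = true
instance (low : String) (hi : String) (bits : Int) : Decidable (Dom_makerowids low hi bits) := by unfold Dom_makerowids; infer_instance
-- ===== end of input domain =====

-- B replaces A's per-integer binary-format-and-pad construction by growing the key list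
-- directly (each round appends a low/high character to every key), a plainer one-pass build.
-- Keys are handled as char lists inside both ports (String ↔ List Char, exact).

-- ===== PORT A =====
-- the `while len(binrep) < bits: binrep = "0" + binrep` loop of A (on char lists; exact)
def pvPad (b : Nat) (s : List Char) : List Char :=
  if s.length < b then pvPad b ('0' :: s) else s
  termination_by b - s.length
  decreasing_by simp only [List.length_cons]; omega

def makerowids (low : String) (hi : String) (bits : Int) : List (String × Int) :=
  -- range(0, 1 << bits): Pre_ gives 0 ≤ bits, so 1 << bits = 2 ^ bits.toNat
  (((PySem.List.pyRange 0 (2 ^ bits.toNat) 1).foldl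
      (fun output i =>
        -- binrep = "{0:b}".format(i), then the pad loop
        let binrep := pvPad bits.toNat (PySem.Int.toBinChars i)
        -- irep = "".join([hi if b == "1" else low for b in binrep])
        let irep := PySem.Chars.join [] (binrep.map (fun b => if b = '1' then hi.toList else low.toList))
        output.insert irep i)
      PySem.Dict.empty).items).map (fun p => (String.ofList p.1, p.2))

-- ===== PORT B =====
def makerowids_alt (low : String) (hi : String) (bits : Int) : List (String × Int) :=
  -- keys = ['']; for _ in range(bits): keys = [k + c for k in keys for c in (low, hi)]
  (((PySem.List.enumerate
        ((List.range bits.toNat).foldl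
          (fun keys _ => keys.flatMap (fun k => [k ++ low.toList, k ++ hi.toList]))
          [([] : List Char)]) 0).foldl
      (fun output p => output.insert p.2 p.1) PySem.Dict.empty).items).map
    (fun p => (String.ofList p.1, p.2))

-- ===== PRECONDITION & SPEC =====
-- Pre_ excludes bits < 0, where Python's `1 << bits` raises ValueError.
def Pre_makerowids (low : String) (hi : String) (bits : Int) : Prop := 0 ≤ bits
instance (low : String) (hi : String) (bits : Int) : Decidable (Pre_makerowids low hi bits) := by unfold Pre_makerowids; infer_instance
def pvWitness_makerowids : String × String × Int := ("a", "b", 1)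

-- On bits = 0 with low ≠ "" A returns {low: 0} (an artefact of padding 0 to "0" and mapping it
-- through low), while B returns {"": 0}, the intended empty key for a zero-bit pattern.
def D_makerowids (low : String) (hi : String) (bits : Int) : Prop := bits = 0 ∧ low ≠ ""
instance (low : String) (hi : String) (bits : Int) : Decidable (D_makerowids low hi bits) := by unfold D_makerowids; infer_instance

def Spec_makerowids (low : String) (hi : String) (bits : Int) (out : List (String × Int)) : Prop := ¬ D_makerowids low hi bits → out = makerowids_alt low hi bits
instance (low : String) (hi : String) (bits : Int) (out : List (String × Int)) : Decidable (Spec_makerowids low hi bits out) := by unfold Spec_makerowids; infer_instance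

def pvDiffWitness_makerowids : String × String × Int := ("a", "b", 0)
def pvDiffWitnessOut_makerowids : (List (String × Int)) × (List (String × Int)) :=
  ([("a", 0)], [("", 0)])

-- ===== CLAIM (what is proved, stated in full; the proofs are below) =====
def Claim_unchanged_makerowids : Prop := ∀ (low : String) (hi : String) (bits : Int), Dom_makerowids low hi bits → Pre_makerowids low hi bits → Spec_makerowids low hi bits (makerowids low hi bits)
def Claim_changed_makerowids : Prop := Dom_makerowids (pvDiffWitness_makerowids.1) (pvDiffWitness_makerowids.2.1) (pvDiffWitness_makerowids.2.2) ∧ Pre_makerowids (pvDiffWitness_makerowids.1) (pvDiffWitness_makerowids.2.1) (pvDiffWitness_makerowids.2.2) ∧ D_makerowids (pvDiffWitness_makerowids.1) (pvDiffWitness_makerowids.2.1) (pvDiffWitness_makerowids.2.2) ∧ makerowids (pvDiffWitness_makerowids.1) (pvDiffWitness_makerowids.2.1) (pvDiffWitness_makerowids.2.2) = pvDiffWitnessOut_makerowids.1 ∧ makerowids_alt (pvDiffWitness_makerowids.1) (pvDiffWitness_makerowids.2.1) (pvDiffWitness_makerowids.2.2) = pvDiffWitnessOut_makerowids.2 ∧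 pvDiffWitnessOut_makerowids.1 ≠ pvDiffWitnessOut_makerowids.2
def Claim_exact_makerowids : Prop := ∀ (low : String) (hi : String) (bits : Int), Dom_makerowids low hi bits → Pre_makerowids low hi bits → D_makerowids low hi bits → makerowids low hi bits ≠ makerowids_alt low hi bits

-- ===== LEMMAS AND PROOFS =====

-- A's pad loop prepends exactly enough zeros
theorem pvPad_eq (b : Nat) (s : List Char) :
    pvPad b s = List.replicate (b - s.length) '0' ++ s := by
  by_cases h : s.length < b
  · rw [pvPad, if_pos h, pvPad_eq b ('0' :: s)]
    simp only [List.length_cons]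
    have hb : b - s.length = (b - (s.length + 1)) + 1 := by omega
    rw [hb, List.replicate_succ', List.append_assoc]
    rfl
  · rw [pvPad, if_neg h]
    have : b - s.length = 0 := by omega
    simp [this]
  termination_by b - s.length
  decreasing_by simp only [List.length_cons]; omega

-- the msb-first recursion behind "{0:b}".format
def pvBin (n : Nat) : List Char :=
  if n < 2 then [Nat.digitChar n] else pvBin (n / 2) ++ [Nat.digitChar (n % 2)]
  termination_by n
  decreasing_by omega

theorem toDigitsCore_eq_pvBin : ∀ (f n : Nat) (l : List Char), n ≤ f →
    Nat.toDigitsCore 2 (f + 1) n l = pvBin n ++ l := by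
  intro f
  induction f with
  | zero =>
    intro n l hn
    interval_cases n
    simp [Nat.toDigitsCore, pvBin]
  | succ f ih =>
    intro n l hn
    by_cases h2 : n < 2
    · have : n / 2 = 0 := by omega
      rw [pvBin, if_pos h2]
      simp [Nat.toDigitsCore, this]
      interval_cases n <;> rfl
    · have hdiv : ¬ n / 2 = 0 := by omega
      rw [pvBin, if_neg h2]
      rw [Nat.toDigitsCore]
      simp only [if_neg hdiv]
      rw [ih (n / 2) _ (by omega)]
      simp

theorem toBinChars_natCast (k : Nat) : PySem.Int.toBinChars (k : Int) = pvBin k := by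
  simp only [PySem.Int.toBinChars]
  rw [if_neg (by omega)]
  simp only [Int.toNat_natCast]
  have h := toDigitsCore_eq_pvBin k k [] le_rfl
  simpa [Nat.toDigits] using h

-- joining with the empty separator is concatenation
theorem join_nil_eq_flatten : ∀ (l : List (List Char)), PySem.Chars.join [] l = l.flatten := by
  intro l
  induction l with
  | nil => simp [PySem.Chars.join_nil]
  | cons a t ih =>
    cases t with
    | nil => simp [PySem.Chars.join_singleton]
    | cons b t' => rw [PySem.Chars.join_cons_cons]; simp_all

-- the padded binary representation splits off its last bit
theorem pad_bin_split (n i : Nat) (hn : 1 ≤ n) :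
    List.replicate ((n + 1) - (pvBin i).length) '0' ++ pvBin i =
      (List.replicate (n - (pvBin (i / 2)).length) '0' ++ pvBin (i / 2)) ++ [Nat.digitChar (i % 2)] := by
  by_cases h2 : i < 2
  · have hd : i / 2 = 0 := by omega
    have hm : i % 2 = i := by omega
    rw [pvBin, if_pos h2, hd, hm]
    have h0 : pvBin 0 = ['0'] := by rw [pvBin]; rfl
    rw [h0]
    simp only [List.length_cons, List.length_nil]
    have h1 : (n + 1) - 1 = (n - 1) + 1 := by omega
    rw [h1, List.replicate_succ', List.append_assoc]
  · rw [pvBin, if_neg h2]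
    simp only [List.length_append, List.length_cons, List.length_nil]
    have : (n + 1) - ((pvBin (i / 2)).length + (0 + 1)) = n - (pvBin (i / 2)).length := by omega
    rw [this, ← List.append_assoc]

-- A's key for row i with bits = n, as a char list
def pvKey (low hi : String) (n i : Nat) : List Char :=
  PySem.Chars.join [] ((pvPad n (pvBin i)).map (fun c => if c = '1' then hi.toList else low.toList))

theorem pvKey_even (low hi : String) (n j : Nat) (hn : 1 ≤ n) :
    pvKey low hi (n + 1) (2 * j) = pvKey low hi n j ++ low.toList := by
  unfold pvKey
  rw [pvPad_eq, pvPad_eq, pad_bin_split n (2 * j) hn]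
  have hd : 2 * j / 2 = j := by omega
  have hm : 2 * j % 2 = 0 := by omega
  rw [hd, hm, List.map_append, join_nil_eq_flatten, join_nil_eq_flatten, List.flatten_append]
  simp [Nat.digitChar]

theorem pvKey_odd (low hi : String) (n j : Nat) (hn : 1 ≤ n) :
    pvKey low hi (n + 1) (2 * j + 1) = pvKey low hi n j ++ hi.toList := by
  unfold pvKey
  rw [pvPad_eq, pvPad_eq, pad_bin_split n (2 * j + 1) hn]
  have hd : (2 * j + 1) / 2 = j := by omega
  have hm : (2 * j + 1) % 2 = 1 := by omega
  rw [hd, hm, List.map_append, join_nil_eq_flatten, join_nil_eq_flatten, List.flatten_append]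
  simp [Nat.digitChar]

theorem pvRange_two_mul (M : Nat) :
    List.range (2 * M) = (List.range M).flatMap (fun j => [2 * j, 2 * j + 1]) := by
  induction M with
  | zero => rfl
  | succ M ih =>
    have : 2 * (M + 1) = (2 * M) + 1 + 1 := by omega
    rw [this, List.range_succ, List.range_succ, List.range_succ, ih, List.flatMap_append]
    simp

-- B's key list after n rounds is A's keys in order
theorem keys_eq (low hi : String) : ∀ (n : Nat), 1 ≤ n →
    (List.range n).foldl
        (fun keys _ => keys.flatMap (fun k => [k ++ low.toList, k ++ hi.toList]))
        [([] : List Char)]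
      = (List.range (2 ^ n)).map (pvKey low hi n) := by
  intro n
  induction n with
  | zero => omega
  | succ n ih =>
    intro _
    by_cases hn : 1 ≤ n
    · rw [List.range_succ, List.foldl_append, ih hn]
      have h2 : (2 : Nat) ^ (n + 1) = 2 * 2 ^ n := by ring
      rw [h2, pvRange_two_mul, List.map_flatMap, List.foldl_cons, List.foldl_nil,
        List.flatMap_map]
      apply List.flatMap_congr
      intro j _
      simp only [List.map_cons, List.map_nil]
      rw [pvKey_even low hi n j hn, pvKey_odd low hi n j hn]
    · have hn0 : n = 0 := by omega
      subst hn0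
      have k0 : pvKey low hi 1 0 = low.toList := by
        unfold pvKey
        rw [pvPad_eq]
        have h0 : pvBin 0 = ['0'] := by rw [pvBin]; rfl
        rw [h0]
        simp [PySem.Chars.join_singleton]
      have k1 : pvKey low hi 1 1 = hi.toList := by
        unfold pvKey
        rw [pvPad_eq]
        have h1 : pvBin 1 = ['1'] := by rw [pvBin]; rfl
        rw [h1]
        simp [PySem.Chars.join_singleton]
      simp [List.range_succ, k0, k1]

theorem enumerate_map_range {α : Type} (g : Nat → α) : ∀ (N : Nat),
    PySem.List.enumerate ((List.range N).map g) 0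
      = (List.range N).map (fun (k : Nat) => ((k : Int), g k)) := by
  intro N
  induction N with
  | zero => simp [PySem.List.enumerate_nil]
  | succ N ih =>
    rw [List.range_succ, List.map_append, PySem.List.enumerate_append, ih, List.map_append]
    simp [PySem.List.enumerate_cons, PySem.List.enumerate_nil]

-- both ports on bits = n ≥ 0, reduced to the same fold
theorem makerowids_eq_fold (low hi : String) (bits : Int) (hb : 0 ≤ bits) :
    makerowids low hi bits
      = (((List.range (2 ^ bits.toNat)).foldl
            (fun d k => d.insert (pvKey low hi bits.toNat k) (k : Int))
            PySem.Dict.empty).items).map (fun p => (String.ofList p.1, p.2)) := by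
  unfold makerowids
  rw [PySem.List.pyRange_one]
  have hN : (((2 : Int) ^ bits.toNat) - 0).toNat = 2 ^ bits.toNat := by
    rw [sub_zero, show ((2 : Int) ^ bits.toNat) = ((2 ^ bits.toNat : Nat) : Int) by push_cast; ring,
      Int.toNat_natCast]
  rw [hN, List.foldl_map]
  congr 1
  apply congrArg PySem.Dict.items
  apply PySem.List.foldl_congr_mem
  intro d k _
  have h0 : (0 : Int) + (k : Int) = (k : Int) := by ring
  rw [h0, toBinChars_natCast]
  rfl

theorem makerowids_alt_eq_fold (low hi : String) (bits : Int) (hb : 1 ≤ bits) :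
    makerowids_alt low hi bits
      = (((List.range (2 ^ bits.toNat)).foldl
            (fun d k => d.insert (pvKey low hi bits.toNat k) (k : Int))
            PySem.Dict.empty).items).map (fun p => (String.ofList p.1, p.2)) := by
  unfold makerowids_alt
  rw [keys_eq low hi bits.toNat (by omega), enumerate_map_range, List.foldl_map]

theorem makerowids_zero (low hi : String) :
    makerowids low hi 0 = [(String.ofList low.toList, 0)] := by
  unfold makerowids
  have hr : PySem.List.pyRange 0 (2 ^ (0 : Int).toNat) 1 = [0] := by decide
  rw [hr]
  simp only [List.foldl_cons, List.foldl_nil]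
  have hb : PySem.Int.toBinChars 0 = ['0'] := by decide
  have hp : pvPad (0 : Int).toNat ['0'] = ['0'] := by rw [pvPad]; rfl
  rw [hb, hp]
  simp [PySem.Chars.join_singleton, PySem.Dict.empty, PySem.Dict.insert]

theorem makerowids_alt_zero (low hi : String) :
    makerowids_alt low hi 0 = [("", 0)] := by
  unfold makerowids_alt
  simp [PySem.List.enumerate_cons, PySem.List.enumerate_nil,
    PySem.Dict.empty, PySem.Dict.insert]

-- ===== VERDICT (by name: the statement is the Claim_ definition above) =====
theorem makerowids_spec : Claim_unchanged_makerowids := by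
  intro low hi bits _ hpre
  unfold Spec_makerowids
  intro hnd
  unfold Pre_makerowids at hpre
  unfold D_makerowids at hnd
  by_cases h0 : bits = 0
  · have hlow : low = "" := by
      by_contra hne
      exact hnd ⟨h0, hne⟩
    subst hlow h0
    rw [makerowids_zero, makerowids_alt_zero]
    rfl
  · rw [makerowids_eq_fold low hi bits hpre,
      makerowids_alt_eq_fold low hi bits (by omega)]

theorem makerowids_changed : Claim_changed_makerowids := by
  unfold Claim_changed_makerowids
  refine ⟨by decide, by decide, by decide, ?_, ?_, by decide⟩
  · rw [show pvDiffWitness_makerowids.2.2 = (0 : Int) from rfl, makerowids_zero]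
    rfl
  · rw [show pvDiffWitness_makerowids.2.2 = (0 : Int) from rfl, makerowids_alt_zero]
    rfl

theorem makerowids_tight : Claim_exact_makerowids := by
  intro low hi bits _ _ hd
  unfold D_makerowids at hd
  obtain ⟨h0, hlow⟩ := hd
  subst h0
  rw [makerowids_zero, makerowids_alt_zero]
  intro h
  apply hlow
  have := List.head_eq_of_cons_eq h
  have h1 : String.ofList low.toList = "" := (Prod.ext_iff.mp this).1
  have h2 : low.toList = [] := by
    have := congrArg String.toList h1
    simpa [String.toList_ofList] using this
  cases low
  simpa using congrArg String.ofList h2
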